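-- pv_equiv track=rewrite | github.com/GiuseppeDaddario/MNLP_Hw2 | t5.py | split_example
-- ===== SOURCE A (Python) =====
-- def split_example(ocr_text, correct_text, max_len=50):
--     split_ocr = []
--     split_correct = []
--     i = 0
--     while i < len(ocr_text):
--         end = i + max_len
--         if end < len(ocr_text):
--             space_pos = ocr_text.rfind(" ", i, end)
--             if space_pos != -1 and space_pos > i:
--                 end = space_pos
--         else:
--             end = len(ocr_text)
--
--         split_ocr.append(ocr_text[i:end].strip())
--         split_correct.append(correct_text[i:end].strip())
--         i = end
--     return list(zip(split_ocr, split_correct))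
-- ===== SOURCE B (Python) =====
-- def split_example(ocr_text, correct_text, max_len=50):
--     n = len(ocr_text)
--     spaces = [j for j, c in enumerate(ocr_text) if c == " "]
--     out = []
--     i = 0
--     p = 0
--     while i < n:
--         end = i + max_len
--         if end < n:
--             while p < len(spaces) and spaces[p] < end:
--                 p += 1
--             if p > 0 and spaces[p - 1] > i:
--                 end = spaces[p - 1]
--         else:
--             end = n
--         out.append((ocr_text[i:end].strip(), correct_text[i:end].strip()))
--         i = end
--     return out
-- ===== Notes on version B (the rewrite author's own statement) =====
-- stated objective: alternative
-- what changed: A rescans each chunk window backwards with str.rfind; B builds an index of all space positions once and walks it left-to-right with a monotone pointer to pick each cut, so the per-chunk backward scan disappears.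
import Mathlib
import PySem

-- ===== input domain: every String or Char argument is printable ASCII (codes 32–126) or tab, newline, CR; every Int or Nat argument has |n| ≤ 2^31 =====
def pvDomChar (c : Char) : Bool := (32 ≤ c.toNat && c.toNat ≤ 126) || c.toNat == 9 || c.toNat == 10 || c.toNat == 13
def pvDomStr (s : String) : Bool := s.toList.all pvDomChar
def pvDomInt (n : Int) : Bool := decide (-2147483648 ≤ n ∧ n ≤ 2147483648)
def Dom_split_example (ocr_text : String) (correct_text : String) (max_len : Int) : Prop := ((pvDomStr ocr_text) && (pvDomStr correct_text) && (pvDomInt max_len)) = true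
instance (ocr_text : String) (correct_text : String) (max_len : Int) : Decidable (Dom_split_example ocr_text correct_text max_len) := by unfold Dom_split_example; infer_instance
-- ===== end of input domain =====

-- B replaces A's per-chunk backward rfind scan by an index of all space positions built once,
-- walked left-to-right with a monotone pointer while cutting ('alternative').

-- ===== PORT A =====
-- the while loop of A: state (i, split_ocr, split_correct); fuel = len(ocr_text) is enough
-- whenever the Python loop terminates (under Pre_, i strictly increases each iteration from 0)
def pvLoopA (ocr_text correct_text : String) (max_len : Int) :
    Nat → Int → List String → List String → List String × List String
  | 0, _, split_ocr, split_correct => (split_ocr, split_correct)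
  | fuel+1, i, split_ocr, split_correct =>
    if i < PySem.Str.len ocr_text then
      let e :=
        if i + max_len < PySem.Str.len ocr_text then
          let space_pos := PySem.Str.rfindFrom ocr_text " " i (some (i + max_len))
          if space_pos ≠ -1 ∧ i < space_pos then space_pos else i + max_len
        else PySem.Str.len ocr_text
      pvLoopA ocr_text correct_text max_len fuel e
        (split_ocr ++ [PySem.Str.strip (PySem.Str.slice ocr_text (some i) (some e))])
        (split_correct ++ [PySem.Str.strip (PySem.Str.slice correct_text (some i) (some e))])
    else (split_ocr, split_correct)

def split_example (ocr_text : String) (correct_text : String) (max_len : Int) : List (String × String) :=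
  let r := pvLoopA ocr_text correct_text max_len ocr_text.toList.length 0 [] []
  r.1.zip r.2

-- ===== PORT B =====
-- B's inner while: advance the pointer p past all recorded space positions < e
def pvAdvance (spaces : List Int) (e : Int) : Nat → Nat → Nat
  | 0, p => p
  | fuel+1, p =>
    match spaces[p]? with
    | some v => if v < e then pvAdvance spaces e fuel (p+1) else p
    | none => p

-- B's outer while: state (i, p, out); the pointer p only ever moves forward
def pvLoopB (ocr_text correct_text : String) (max_len : Int) (spaces : List Int) :
    Nat → Int → Nat → List (String × String) → List (String × String)
  | 0, _, _, out => out
  | fuel+1, i, p, out =>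
    if i < PySem.Str.len ocr_text then
      if i + max_len < PySem.Str.len ocr_text then
        let p' := pvAdvance spaces (i + max_len) (spaces.length - p) p
        let e :=
          match spaces[p'-1]? with
          | some sp => if 0 < p' ∧ i < sp then sp else i + max_len
          | none => i + max_len
        pvLoopB ocr_text correct_text max_len spaces fuel e p'
          (out ++ [(PySem.Str.strip (PySem.Str.slice ocr_text (some i) (some e)),
                    PySem.Str.strip (PySem.Str.slice correct_text (some i) (some e)))])
      else
        pvLoopB ocr_text correct_text max_len spaces fuel (PySem.Str.len ocr_text) p
          (out ++ [(PySem.Str.strip (PySem.Str.slice ocr_text (some i) (some (PySem.Str.len ocr_text))),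
                    PySem.Str.strip (PySem.Str.slice correct_text (some i) (some (PySem.Str.len ocr_text))))])
    else out

def split_example_alt (ocr_text : String) (correct_text : String) (max_len : Int) : List (String × String) :=
  let spaces := ((PySem.List.enumerate ocr_text.toList 0).filter (fun q => q.2 == ' ')).map (fun q => q.1)
  pvLoopB ocr_text correct_text max_len spaces ocr_text.toList.length 0 0 []

-- ===== PRECONDITION & SPEC =====
-- Pre_ excludes non-positive max_len with a nonempty ocr_text: there A's loop never reaches
-- i ≥ len(ocr_text) and the Python runs forever (returns on nothing it excludes).
def Pre_split_example (ocr_text : String) (correct_text : String) (max_len : Int) : Prop :=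
  ocr_text = "" ∨ 1 ≤ max_len
instance (ocr_text : String) (correct_text : String) (max_len : Int) : Decidable (Pre_split_example ocr_text correct_text max_len) := by unfold Pre_split_example; infer_instance

def pvWitness_split_example : String × String × Int := ("ab cd e", "xy zw q", 4)

def Spec_split_example (ocr_text : String) (correct_text : String) (max_len : Int) (out : List (String × String)) : Prop := out = split_example_alt ocr_text correct_text max_len
instance (ocr_text : String) (correct_text : String) (max_len : Int) (out : List (String × String)) : Decidable (Spec_split_example ocr_text correct_text max_len out) := by unfold Spec_split_example; infer_instance

-- ===== CLAIM (what is proved, stated in full; the proofs are below) =====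
def Claim_equal_split_example : Prop := ∀ (ocr_text : String) (correct_text : String) (max_len : Int), Dom_split_example ocr_text correct_text max_len → Pre_split_example ocr_text correct_text max_len → Spec_split_example ocr_text correct_text max_len (split_example ocr_text correct_text max_len)

-- ===== LEMMAS AND PROOFS =====

lemma pv_singleton_isPrefixOf (c : Char) (l : List Char) :
    [c].isPrefixOf l = true ↔ l.head? = some c := by
  cases l with
  | nil => simp [List.isPrefixOf]
  | cons a t =>
    simp only [List.isPrefixOf, List.head?_cons, Option.some_inj, Bool.and_eq_true, beq_iff_eq,
      List.isPrefixOf_nil_left, and_true]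
    exact eq_comm

lemma pv_rfind_go_spec (t : List Char) (c : Char) : ∀ k : Nat,
    (PySem.Chars.rfind.go t [c] k = -1 ∧ ∀ j, j ≤ k → t[j]? ≠ some c) ∨
    (∃ j : Nat, j ≤ k ∧ PySem.Chars.rfind.go t [c] k = (j : Int) ∧ t[j]? = some c ∧
      ∀ j', j < j' → j' ≤ k → t[j']? ≠ some c) := by
  intro k
  induction k with
  | zero =>
    by_cases h : t[0]? = some c
    · right
      refine ⟨0, le_rfl, ?_, h, by omega⟩
      have : [c] <+: t := by
        have := (pv_singleton_isPrefixOf c t).2 (by rw [List.head?_eq_getElem?]; exact h)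
        exact List.isPrefixOf_iff_prefix.mp this
      simp [PySem.Chars.rfind.go, this]
    · left
      constructor
      · have : ¬ [c] <+: t := by
          intro hp
          exact h (by rw [← List.head?_eq_getElem?]; exact (pv_singleton_isPrefixOf c t).1 (List.isPrefixOf_iff_prefix.mpr hp))
        simp [PySem.Chars.rfind.go, this]
      · intro j hj; interval_cases j; exact h
  | succ k ih =>
    have hgo : PySem.Chars.rfind.go t [c] (k+1) =
        if [c].isPrefixOf (t.drop (k+1)) then ((k:Int)+1) else PySem.Chars.rfind.go t [c] k := by
      rw [PySem.Chars.rfind.go]; push_cast; rfl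
    by_cases h : t[k+1]? = some c
    · right
      refine ⟨k+1, le_rfl, ?_, h, by omega⟩
      rw [hgo, if_pos]; · push_cast; ring
      rw [pv_singleton_isPrefixOf, List.head?_drop]; exact h
    · have hgo' : PySem.Chars.rfind.go t [c] (k+1) = PySem.Chars.rfind.go t [c] k := by
        rw [hgo, if_neg]
        rw [pv_singleton_isPrefixOf, List.head?_drop]; exact h
      rcases ih with ⟨h1, h2⟩ | ⟨j, hj, h1, h2, h3⟩
      · left
        refine ⟨by rw [hgo']; exact h1, ?_⟩
        intro j hj
        rcases Nat.lt_or_ge j (k+1) with hlt | hge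
        · exact h2 j (by omega)
        · have : j = k+1 := by omega
          subst this; exact h
      · right
        refine ⟨j, by omega, by rw [hgo']; exact h1, h2, ?_⟩
        intro j' hj1 hj2
        rcases Nat.lt_or_ge j' (k+1) with hlt | hge
        · exact h3 j' hj1 (by omega)
        · have : j' = k+1 := by omega
          subst this; exact h

lemma pv_rfind_spec (t : List Char) (c : Char) :
    (PySem.Chars.rfind t [c] = -1 ∧ ∀ j : Nat, t[j]? ≠ some c) ∨
    (∃ j : Nat, PySem.Chars.rfind t [c] = (j : Int) ∧ t[j]? = some c ∧
      ∀ j', j < j' → t[j']? ≠ some c) := by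
  have h := pv_rfind_go_spec t c t.length
  rcases h with ⟨h1, h2⟩ | ⟨j, hj, h1, h2, h3⟩
  · left
    refine ⟨h1, ?_⟩
    intro j
    rcases Nat.lt_or_ge t.length j with hlt | hle
    · simp [List.getElem?_eq_none (show t.length ≤ j by omega)]
    · exact h2 j hle
  · right
    refine ⟨j, h1, h2, ?_⟩
    intro j' hj'
    rcases Nat.lt_or_ge t.length j' with hlt | hle
    · simp [List.getElem?_eq_none (show t.length ≤ j' by omega)]
    · exact h3 j' hj' hle

lemma pv_advance_spec (spaces : List Int) (e : Int) : ∀ (fuel p : Nat),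
    spaces.length - p ≤ fuel →
    p ≤ pvAdvance spaces e fuel p ∧
    (p ≤ spaces.length → pvAdvance spaces e fuel p ≤ spaces.length) ∧
    (∀ k v, p ≤ k → k < pvAdvance spaces e fuel p → spaces[k]? = some v → v < e) ∧
    (∀ v, spaces[pvAdvance spaces e fuel p]? = some v → e ≤ v) := by
  intro fuel
  induction fuel with
  | zero =>
    intro p hf
    have hp : spaces.length ≤ p := by omega
    simp only [pvAdvance]
    refine ⟨le_rfl, fun h => h, by omega, ?_⟩
    intro v hv
    rw [List.getElem?_eq_none hp] at hv
    exact absurd hv (by simp)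
  | succ fuel ih =>
    intro p hf
    match hsp : spaces[p]? with
    | none =>
      have hadv : pvAdvance spaces e (fuel+1) p = p := by simp [pvAdvance, hsp]
      refine ⟨by omega, by rw [hadv]; exact fun h => h, by intro k v h1 h2; rw [hadv] at h2; omega, ?_⟩
      intro v hv
      rw [hadv, hsp] at hv
      exact absurd hv (by simp)
    | some v =>
      by_cases hlt : v < e
      · have hrec := ih (p+1) (by omega)
        have hadv : pvAdvance spaces e (fuel+1) p = pvAdvance spaces e fuel (p+1) := by
          simp [pvAdvance, hsp, hlt]
        have hplen : p < spaces.length := by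
          by_contra hc
          rw [List.getElem?_eq_none (by omega)] at hsp
          exact absurd hsp (by simp)
        refine ⟨by rw [hadv]; omega, by rw [hadv]; intro _; exact hrec.2.1 (by omega), ?_, by rw [hadv]; exact hrec.2.2.2⟩
        intro k w hk1 hk2 hkw
        rcases Nat.lt_or_ge k (p+1) with hc | hc
        · have : k = p := by omega
          subst this
          rw [hsp] at hkw
          cases hkw; exact hlt
        · exact hrec.2.2.1 k w hc (by rw [← hadv]; exact hk2) hkw
      · have hadv : pvAdvance spaces e (fuel+1) p = p := by
          simp [pvAdvance, hsp, hlt]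
        refine ⟨by omega, by rw [hadv]; exact fun h => h, by rw [hadv]; omega, ?_⟩
        intro w hw
        rw [hadv, hsp] at hw
        cases hw; omega

lemma pv_spaces_mem (cs : List Char) :
    ∀ x : Int, x ∈ ((PySem.List.enumerate cs 0).filter (fun q => q.2 == ' ')).map (fun q => q.1) ↔
      0 ≤ x ∧ ∃ k : Nat, x = (k : Int) ∧ cs[k]? = some ' ' := by
  intro x
  simp only [List.mem_map, List.mem_filter, PySem.List.mem_enumerate_iff]
  constructor
  · rintro ⟨q, ⟨⟨k, hk, rfl⟩, hsp⟩, rfl⟩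
    simp only [beq_iff_eq] at hsp
    refine ⟨by omega, k, by omega, ?_⟩
    rw [List.getElem?_eq_getElem hk, hsp]
  · rintro ⟨hx, k, rfl, hsp⟩
    have hk : k < cs.length := by
      by_contra hc
      rw [List.getElem?_eq_none (by omega)] at hsp
      exact absurd hsp (by simp)
    refine ⟨((k : Int), cs[k]), ⟨⟨k, hk, by simp⟩, ?_⟩, rfl⟩
    have : cs[k] = ' ' := by
      rw [List.getElem?_eq_getElem hk] at hsp
      exact Option.some_inj.mp hsp
    simp [this]

lemma pv_spaces_sorted (cs : List Char) :
    (((PySem.List.enumerate cs 0).filter (fun q => q.2 == ' ')).map (fun q => q.1)).Pairwise (· < ·) := by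
  apply List.Pairwise.map
  · exact fun a b h => h
  · exact List.Pairwise.filter _ (PySem.List.pairwise_lt_enumerate cs 0)

lemma pv_sorted_getElem? {spaces : List Int} (Hsort : spaces.Pairwise (· < ·))
    {m k : Nat} {a b : Int} (hmk : m < k)
    (ha : spaces[m]? = some a) (hb : spaces[k]? = some b) : a < b := by
  have hk : k < spaces.length := by
    by_contra hc
    rw [List.getElem?_eq_none (by omega)] at hb
    exact absurd hb (by simp)
  have hm : m < spaces.length := by omega
  rw [List.getElem?_eq_getElem hm] at ha
  rw [List.getElem?_eq_getElem hk] at hb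
  have := List.pairwise_iff_getElem.mp Hsort m k hm hk hmk
  rw [Option.some_inj.mp ha, Option.some_inj.mp hb] at this
  exact this

lemma pv_end_eq (cs : List Char) (spaces : List Int)
    (Hmem : ∀ x : Int, x ∈ spaces ↔ 0 ≤ x ∧ ∃ k : Nat, x = (k : Int) ∧ cs[k]? = some ' ')
    (Hsort : spaces.Pairwise (· < ·))
    (i ml : Int) (hi : 0 ≤ i) (hml : 1 ≤ ml) (hlt : i + ml < (cs.length : Int))
    (p' : Nat) (hp' : p' ≤ spaces.length)
    (hbelow : ∀ k v, k < p' → spaces[k]? = some v → v < i + ml)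
    (habove : ∀ v, spaces[p']? = some v → i + ml ≤ v) :
    (if PySem.Chars.rfindFrom cs [' '] i (some (i + ml)) ≠ -1 ∧
        i < PySem.Chars.rfindFrom cs [' '] i (some (i + ml))
     then PySem.Chars.rfindFrom cs [' '] i (some (i + ml)) else i + ml)
    = (match spaces[p'-1]? with
       | some sp => if 0 < p' ∧ i < sp then sp else i + ml
       | none => i + ml) := by
  have hfrom : PySem.Chars.rfindFrom cs [' '] i (some (i + ml)) =
      (if PySem.Chars.rfind ((cs.take (i+ml).toNat).drop i.toNat) [' '] = -1 then -1
       else i + PySem.Chars.rfind ((cs.take (i+ml).toNat).drop i.toNat) [' ']) := by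
    simp only [PySem.Chars.rfindFrom]
    rw [if_neg (show ¬ ((cs.length : Int) < i + ml) by omega)]
    rw [if_neg (show ¬ (i + ml < 0) by omega)]
    rw [if_neg (show ¬ (i < 0) by omega)]
    rw [if_neg (show ¬ (i + ml < i) by omega)]
  set t := (cs.take (i+ml).toNat).drop i.toNat with htdef
  have ht : ∀ j : Nat, t[j]? = some ' ' ↔ (i.toNat + j < (i+ml).toNat ∧ cs[i.toNat + j]? = some ' ') := by
    intro j
    rw [htdef, List.getElem?_drop, List.getElem?_take]
    by_cases hj : i.toNat + j < (i+ml).toNat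
    · simp [hj]
    · simp [hj]
  rcases pv_rfind_spec t ' ' with ⟨h1, h2⟩ | ⟨j, h1, h2, h3⟩
  · -- no space anywhere in the window [i, i+ml)
    rw [hfrom, h1, if_pos rfl, if_neg (by simp)]
    match hsp : spaces[p'-1]? with
    | none => rfl
    | some sp =>
      show i + ml = if 0 < p' ∧ i < sp then sp else i + ml
      by_cases hg : 0 < p' ∧ i < sp
      · exfalso
        rcases (Hmem sp).mp (List.mem_of_getElem? hsp) with ⟨hsp0, k, hk, hkc⟩
        have hlt2 : sp < i + ml := hbelow (p'-1) sp (by omega) hsp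
        refine h2 (k - i.toNat) ((ht _).mpr ⟨by omega, ?_⟩)
        rw [show i.toNat + (k - i.toNat) = k by omega]; exact hkc
      · rw [if_neg hg]
  · -- the window's last space is at offset j
    have hj1 := (ht j).mp h2
    rw [hfrom, h1, if_neg (show ¬(((j : Nat) : Int) = -1) by omega)]
    by_cases hj0 : 0 < j
    · -- A snaps to i + j; B's pointer candidate is the same position
      rw [if_pos (show (i + (j:Int) ≠ -1 ∧ i < i + (j:Int)) from ⟨by omega, by omega⟩)]
      have hx_mem : (i + (j : Int)) ∈ spaces := by
        rw [Hmem]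
        exact ⟨by omega, i.toNat + j, by omega, hj1.2⟩
      rcases List.getElem?_of_mem hx_mem with ⟨m, hm⟩
      have hm_len : m < spaces.length := by
        by_contra hc
        rw [List.getElem?_eq_none (by omega)] at hm
        exact absurd hm (by simp)
      have hmp : m < p' := by
        by_contra hge
        have hp'_len : p' < spaces.length := by omega
        have hub : i + ml ≤ spaces[p'] := habove _ (List.getElem?_eq_getElem hp'_len)
        rcases Nat.lt_or_ge p' m with hc | hc
        · have := pv_sorted_getElem? Hsort hc (List.getElem?_eq_getElem hp'_len) hm
          omega
        · have : m = p' := by omega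
          subst this
          rw [List.getElem?_eq_getElem hm_len] at hm
          have := Option.some_inj.mp hm
          omega
      have hm_eq : m = p' - 1 := by
        by_contra hne
        have hmlt : m < p' - 1 := by omega
        have hp1_len : p' - 1 < spaces.length := by omega
        have hsp' := List.getElem?_eq_getElem hp1_len
        have hgt := pv_sorted_getElem? Hsort hmlt hm hsp'
        have hlt2 : spaces[p'-1] < i + ml := hbelow (p'-1) _ (by omega) hsp'
        rcases (Hmem _).mp (List.getElem_mem hp1_len) with ⟨hs0, k, hk, hkc⟩
        refine h3 (k - i.toNat) (by omega) ((ht _).mpr ⟨by omega, ?_⟩)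
        rw [show i.toNat + (k - i.toNat) = k by omega]; exact hkc
      rw [← hm_eq, hm]
      show i + (j:Int) = if 0 < p' ∧ i < i + (j:Int) then i + (j:Int) else i + ml
      rw [if_pos ⟨by omega, by omega⟩]
    · -- j = 0 : the only window space is at i itself; neither side snaps
      rw [if_neg (show ¬(i + (j:Int) ≠ -1 ∧ i < i + (j:Int)) by omega)]
      match hsp : spaces[p'-1]? with
      | none => rfl
      | some sp =>
        show i + ml = if 0 < p' ∧ i < sp then sp else i + ml
        by_cases hg : 0 < p' ∧ i < sp
        · exfalso
          rcases (Hmem sp).mp (List.mem_of_getElem? hsp) with ⟨hsp0, k, hk, hkc⟩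
          have hlt2 : sp < i + ml := hbelow (p'-1) sp (by omega) hsp
          refine h3 (k - i.toNat) (by omega) ((ht _).mpr ⟨by omega, ?_⟩)
          rw [show i.toNat + (k - i.toNat) = k by omega]; exact hkc
        · rw [if_neg hg]

lemma pv_loop_eq (ocr_text correct_text : String) (max_len : Int) (spaces : List Int)
    (Hmem : ∀ x : Int, x ∈ spaces ↔ 0 ≤ x ∧ ∃ k : Nat, x = (k : Int) ∧ ocr_text.toList[k]? = some ' ')
    (Hsort : spaces.Pairwise (· < ·)) (hml : 1 ≤ max_len) :
    ∀ (fuel : Nat) (i : Int) (p : Nat) (so sc : List String),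
    0 ≤ i → so.length = sc.length → p ≤ spaces.length →
    (∀ k v, k < p → spaces[k]? = some v → v < i + max_len) →
    (pvLoopA ocr_text correct_text max_len fuel i so sc).1.zip
      (pvLoopA ocr_text correct_text max_len fuel i so sc).2
    = pvLoopB ocr_text correct_text max_len spaces fuel i p (so.zip sc) := by
  intro fuel
  induction fuel with
  | zero => intro i p so sc _ _ _ _; simp [pvLoopA, pvLoopB]
  | succ fuel ih =>
    intro i p so sc hi hlen hple hinv
    by_cases hin : i < PySem.Str.len ocr_text
    · have hlen_cs : PySem.Str.len ocr_text = (ocr_text.toList.length : Int) := by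
        simp [PySem.Str.len_eq]
      by_cases hfit : i + max_len < PySem.Str.len ocr_text
      · have hspec := pv_advance_spec spaces (i + max_len) (spaces.length - p) p le_rfl
        obtain ⟨hp_le, hp_ub, hbetween, habove⟩ := hspec
        set p' := pvAdvance spaces (i + max_len) (spaces.length - p) p with hp'def
        have hEq : (if PySem.Str.rfindFrom ocr_text " " i (some (i + max_len)) ≠ -1 ∧
              i < PySem.Str.rfindFrom ocr_text " " i (some (i + max_len))
            then PySem.Str.rfindFrom ocr_text " " i (some (i + max_len)) else i + max_len)
            = (match spaces[p'-1]? with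
               | some sp => if 0 < p' ∧ i < sp then sp else i + max_len
               | none => i + max_len) := by
          have := pv_end_eq ocr_text.toList spaces Hmem Hsort i max_len hi hml
            (by rw [hlen_cs] at hfit; exact_mod_cast hfit) p' (hp_ub hple)
            (by
              intro k v hk hkv
              rcases Nat.lt_or_ge k p with hc | hc
              · exact hinv k v hc hkv
              · exact hbetween k v hc hk hkv)
            habove
          simpa [PySem.Str.rfindFrom] using this
        have hiA : i < (if PySem.Str.rfindFrom ocr_text " " i (some (i + max_len)) ≠ -1 ∧
              i < PySem.Str.rfindFrom ocr_text " " i (some (i + max_len))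
            then PySem.Str.rfindFrom ocr_text " " i (some (i + max_len)) else i + max_len) := by
          split_ifs with h
          · exact h.2
          · omega
        rw [hEq] at hiA
        simp only [pvLoopA, pvLoopB, if_pos hin, if_pos hfit]
        rw [hEq, ← hp'def]
        rw [ih _ p' _ _ (by omega) (by simp [hlen]) (hp_ub hple)
          (by
            intro k v hk hkv
            have hv : v < i + max_len := by
              rcases Nat.lt_or_ge k p with hc | hc
              · exact hinv k v hc hkv
              · exact hbetween k v hc hk hkv
            omega)]
        rw [List.zip_append hlen]
        rfl
      · simp only [pvLoopA, pvLoopB, if_pos hin, if_neg hfit]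
        rw [ih _ p _ _ (by rw [hlen_cs]; positivity) (by simp [hlen]) hple
          (by
            intro k v hk hkv
            have := hinv k v hk hkv
            rw [hlen_cs] at hin ⊢
            omega)]
        rw [List.zip_append hlen]
        rfl
    · simp only [pvLoopA, pvLoopB, if_neg hin]

-- ===== VERDICT (by name: the statement is the Claim_ definition above) =====
theorem split_example_spec : Claim_equal_split_example := by
  intro ocr_text correct_text max_len _ hpre
  unfold Spec_split_example split_example split_example_alt
  rcases hpre with h | hml
  · subst h
    rfl
  · exact pv_loop_eq ocr_text correct_text max_len _
      (pv_spaces_mem ocr_text.toList) (pv_spaces_sorted ocr_text.toList) hml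
      ocr_text.toList.length 0 0 [] [] le_rfl rfl (Nat.zero_le _) (by intro k v hk; omega)
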